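-- pv_equiv track=rewrite | github.com/emezzzzz/fatesclaw | apps/fatesclaw-dashboard/src/fatesclaw_dashboard/oled/views.py | _entry_anchor_line
-- ===== SOURCE A (Python) =====
-- def _entry_anchor_line(selected_entry: int, line_entry_index: list[int], line_is_first: list[bool]) -> int:
--     for index, (entry_index, first) in enumerate(zip(line_entry_index, line_is_first, strict=False)):
--         if first and entry_index == selected_entry:
--             return index
--     for index, entry_index in enumerate(line_entry_index):
--         if entry_index == selected_entry:
--             return index
--     return 0
-- ===== SOURCE B (Python) =====
-- def _entry_anchor_line(selected_entry: int, line_entry_index: list[int], line_is_first: list[bool]) -> int: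
--     # Single pass: return immediately on a matching line that starts its entry;
--     # otherwise remember the first plain match as a fallback.
--     fallback = None
--     for index, entry_index in enumerate(line_entry_index):
--         if entry_index == selected_entry:
--             if index < len(line_is_first) and line_is_first[index]:
--                 return index
--             if fallback is None:
--                 fallback = index
--     return fallback if fallback is not None else 0
-- ===== Notes on version B (the rewrite author's own statement) =====
-- stated objective: faster
-- what changed: Fuses A's two sequential scans (first-of-entry pass over the zip, then plain-match pass) into one loop over line_entry_index that returns immediately on a qualifying first-line match and keeps the earliest plain match as a fallback, halving traversals in the no-first-match case.
import Mathlib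
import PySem

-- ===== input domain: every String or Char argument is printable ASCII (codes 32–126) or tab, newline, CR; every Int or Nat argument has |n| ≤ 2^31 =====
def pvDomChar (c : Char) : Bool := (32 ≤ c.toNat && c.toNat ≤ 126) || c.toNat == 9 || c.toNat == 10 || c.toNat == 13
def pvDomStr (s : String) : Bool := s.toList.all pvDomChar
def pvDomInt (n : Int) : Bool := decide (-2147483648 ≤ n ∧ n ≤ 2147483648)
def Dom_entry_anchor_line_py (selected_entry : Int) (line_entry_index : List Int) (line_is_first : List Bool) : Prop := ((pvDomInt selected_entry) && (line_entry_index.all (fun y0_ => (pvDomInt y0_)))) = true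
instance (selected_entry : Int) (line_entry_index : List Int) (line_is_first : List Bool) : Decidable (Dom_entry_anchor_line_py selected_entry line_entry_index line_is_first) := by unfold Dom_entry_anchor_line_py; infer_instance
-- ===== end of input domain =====

-- B fuses A's two scans into one pass keeping the earliest plain match as a fallback (simpler).


-- ===== PORT A =====
-- first pass: enumerate(zip(...)), return index where first and entry_index == selected_entry
def eaPass1 (sel : Int) : Nat → List (Int × Bool) → Option Nat
  | _, [] => none
  | i, (e, f) :: t => if f && (e == sel) then some i else eaPass1 sel (i + 1) t

-- second pass: enumerate(line_entry_index), return index where entry_index == selected_entry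
def eaPass2 (sel : Int) : Nat → List Int → Option Nat
  | _, [] => none
  | i, e :: t => if e == sel then some i else eaPass2 sel (i + 1) t

def entry_anchor_line_py (selected_entry : Int) (line_entry_index : List Int) (line_is_first : List Bool) : Int :=
  match eaPass1 selected_entry 0 (line_entry_index.zip line_is_first) with
  | some i => (i : Int)
  | none =>
    match eaPass2 selected_entry 0 line_entry_index with
    | some i => (i : Int)
    | none => 0

-- ===== PORT B =====
-- single loop with a maintained fallback (Source B's loop, index i, fallback fb)
def eaLoopB (sel : Int) (lif : List Bool) : Nat → Option Nat → List Int → Int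
  | _, fb, [] => match fb with | some f => (f : Int) | none => 0
  | i, fb, e :: t =>
    if e == sel then
      if decide (i < lif.length) && lif.getD i false then (i : Int)
      else eaLoopB sel lif (i + 1) (match fb with | some f => some f | none => some i) t
    else eaLoopB sel lif (i + 1) fb t

def entry_anchor_line_py_alt (selected_entry : Int) (line_entry_index : List Int) (line_is_first : List Bool) : Int :=
  eaLoopB selected_entry line_is_first 0 none line_entry_index

-- ===== PRECONDITION & SPEC =====
def Spec_entry_anchor_line_py (selected_entry : Int) (line_entry_index : List Int) (line_is_first : List Bool) (out : Int) : Prop := out = entry_anchor_line_py_alt selected_entry line_entry_index line_is_first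
instance (selected_entry : Int) (line_entry_index : List Int) (line_is_first : List Bool) (out : Int) : Decidable (Spec_entry_anchor_line_py selected_entry line_entry_index line_is_first out) := by unfold Spec_entry_anchor_line_py; infer_instance

-- ===== CLAIM (what is proved, stated in full; the proofs are below) =====
def Claim_equal_entry_anchor_line_py : Prop := ∀ (selected_entry : Int) (line_entry_index : List Int) (line_is_first : List Bool), Dom_entry_anchor_line_py selected_entry line_entry_index line_is_first → Spec_entry_anchor_line_py selected_entry line_entry_index line_is_first (entry_anchor_line_py selected_entry line_entry_index line_is_first)

-- ===== LEMMAS AND PROOFS =====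

-- B's loop on a suffix (starting at index i, fallback fb) computed in terms of A's two passes.
theorem eaLoopB_eq (sel : Int) (lif : List Bool) (rest : List Int) : ∀ (i : Nat) (fb : Option Nat),
    eaLoopB sel lif i fb rest =
      match eaPass1 sel i (rest.zip (lif.drop i)) with
      | some j => (j : Int)
      | none =>
        match fb with
        | some f => (f : Int)
        | none =>
          match eaPass2 sel i rest with
          | some j => (j : Int)
          | none => 0 := by
  induction rest with
  | nil => intro i fb; simp [eaLoopB, eaPass1, eaPass2]
  | cons e t ih =>
    intro i fb
    by_cases hlt : i < lif.length
    · have hdrop : lif.drop i = lif[i] :: lif.drop (i + 1) :=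
        List.drop_eq_getElem_cons hlt
      have hgetD : lif.getD i false = lif[i] := by
        simp [List.getD_eq_getElem?_getD, List.getElem?_eq_getElem hlt]
      simp only [eaLoopB]; rw [hdrop]
      simp only [List.zip_cons_cons, eaPass1, eaPass2, hgetD, hlt, decide_true, Bool.true_and]
      by_cases he : e == sel
      · simp only [he, Bool.and_true, if_true]
        by_cases hf : lif[i] = true
        · simp [hf]
        · simp only [Bool.not_eq_true] at hf
          simp only [hf, ih]
          cases fb <;> simp
      · simp only [he, Bool.and_false, ih]
        simp
    · have hdrop : lif.drop i = [] := List.drop_eq_nil_of_le (by omega)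
      simp only [eaLoopB]; rw [hdrop]
      simp only [List.zip_nil_right, eaPass1, eaPass2]
      by_cases he : e == sel
      · have hdrop' : lif.drop (i + 1) = [] := List.drop_eq_nil_of_le (by omega)
        simp only [he, if_true, hlt, decide_false, Bool.false_and, ih, hdrop',
          List.zip_nil_right, eaPass1]
        cases fb <;> simp
      · simp only [he, ih,
          List.drop_eq_nil_of_le (show lif.length ≤ i + 1 by omega), List.zip_nil_right, eaPass1]
        simp

-- ===== VERDICT (by name: the statement is the Claim_ definition above) =====
theorem entry_anchor_line_py_spec : Claim_equal_entry_anchor_line_py := by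
  intro sel lei lif _
  unfold Spec_entry_anchor_line_py entry_anchor_line_py entry_anchor_line_py_alt
  rw [eaLoopB_eq]
  simp
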